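-- pv_equiv track=rewrite | github.com/SadriddinDev/BinarySearch | Problems/Easy/937.py | solve
-- ===== SOURCE A (Python) =====
-- def solve(heights):
--     if not heights:
--         return heights
--     m = heights[-1]
--     arr = [len(heights)-1]
--
--     for i in range(len(heights)-2, -1, -1):
--         if heights[i] > m:
--             m = heights[i]
--             arr.append(i)
--
--     return sorted(arr)
-- ===== SOURCE B (Python) =====
-- def solve(heights):
--     n = len(heights)
--     return [i for i in range(n)
--             if all(heights[i] > heights[j] for j in range(i + 1, n))]
-- ===== Notes on version B (the rewrite author's own statement) =====
-- stated objective: simpler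
-- what changed: Replaces the right-to-left running-max accumulation plus a final sort with a single forward comprehension that keeps index i iff heights[i] is strictly greater than every later element, so the result comes out already sorted.
import Mathlib
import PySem

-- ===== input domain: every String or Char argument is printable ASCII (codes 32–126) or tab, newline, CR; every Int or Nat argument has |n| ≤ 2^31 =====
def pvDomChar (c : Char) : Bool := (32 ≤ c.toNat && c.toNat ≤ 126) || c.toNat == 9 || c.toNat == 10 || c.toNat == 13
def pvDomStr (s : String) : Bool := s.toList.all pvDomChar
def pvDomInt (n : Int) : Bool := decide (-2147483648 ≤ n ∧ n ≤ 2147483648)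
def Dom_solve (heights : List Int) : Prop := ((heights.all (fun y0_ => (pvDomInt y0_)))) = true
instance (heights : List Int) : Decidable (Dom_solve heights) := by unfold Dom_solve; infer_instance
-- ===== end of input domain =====

-- B drops A's right-to-left running-max loop and final sort: a forward comprehension keeps
-- index i iff heights[i] is strictly greater than every later element (objective: simpler).

-- ===== PORT A =====
def solve (heights : List Int) : List Int :=
  if heights = [] then heights
  else
    let st := (PySem.List.pyRange ((heights.length : Int) - 2) (-1) (-1)).foldl
      (fun (s : Int × List Int) (i : Int) =>
        if PySem.List.pyGetD heights i 0 > s.1 then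
          (PySem.List.pyGetD heights i 0, s.2 ++ [i])
        else s)
      (PySem.List.pyGetD heights (-1) 0, [(heights.length : Int) - 1])
    PySem.List.sorted st.2 (fun x => x) false

-- ===== PORT B =====
def solve_alt (heights : List Int) : List Int :=
  (PySem.List.pyRange 0 (heights.length : Int) 1).filter
    (fun i => (PySem.List.pyRange (i + 1) (heights.length : Int) 1).all
      (fun j => decide (PySem.List.pyGetD heights i 0 > PySem.List.pyGetD heights j 0)))

-- ===== PRECONDITION & SPEC =====
def Spec_solve (heights : List Int) (out : List Int) : Prop := out = solve_alt heights
instance (heights : List Int) (out : List Int) : Decidable (Spec_solve heights out) := by unfold Spec_solve; infer_instance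

-- ===== CLAIM (what is proved, stated in full; the proofs are below) =====
def Claim_equal_solve : Prop := ∀ (heights : List Int), Dom_solve heights → Spec_solve heights (solve heights)

-- ===== LEMMAS AND PROOFS =====

-- max of x together with ys (Python's running max of a nonempty suffix)
def mymax (x : Int) (ys : List Int) : Int := ys.foldl max x

-- "index i is a leader": strictly greater than every element to its right
def leadB (heights : List Int) (i : Nat) : Bool :=
  (heights.drop (i + 1)).all (fun x => decide (heights.getD i 0 > x))

-- running max of the suffix starting at t
def Msuf (heights : List Int) (t : Nat) : Int :=
  mymax (heights.getD t 0) (heights.drop (t + 1))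

-- leaders with index ≥ t, in decreasing order, as Ints (A's arr after summarizing suffix t)
def Ldesc (heights : List Int) (t : Nat) : List Int :=
  (((List.range' t (heights.length - t)).filter (leadB heights)).reverse).map Int.ofNat

lemma mymax_max (x y : Int) (ys : List Int) :
    mymax (max x y) ys = max x (mymax y ys) := by
  induction ys generalizing x y with
  | nil => rfl
  | cons z zs ih =>
      simp only [mymax, List.foldl_cons] at *
      rw [max_assoc, ih]

lemma mymax_cons (x y : Int) (ys : List Int) :
    mymax x (y :: ys) = max x (mymax y ys) := by
  simp only [mymax, List.foldl_cons]
  exact mymax_max x y ys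

lemma self_le_mymax (x : Int) (ys : List Int) : x ≤ mymax x ys := by
  induction ys generalizing x with
  | nil => simp [mymax]
  | cons y ys ih => rw [mymax_cons]; exact le_max_left _ _

lemma mem_le_mymax (x a : Int) (ys : List Int) (ha : a ∈ ys) : a ≤ mymax x ys := by
  induction ys generalizing x with
  | nil => cases ha
  | cons y ys ih =>
      rw [mymax_cons]
      rcases List.mem_cons.mp ha with h | h
      · subst h; exact le_trans (self_le_mymax a ys) (le_max_right _ _)
      · exact le_trans (ih y h) (le_max_right _ _)

lemma mymax_mem (x : Int) (ys : List Int) : mymax x ys ∈ x :: ys := by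
  induction ys generalizing x with
  | nil => simp [mymax]
  | cons y ys ih =>
      rw [mymax_cons]
      rcases max_choice x (mymax y ys) with h | h
      · rw [h]; exact List.mem_cons_self
      · rw [h]
        exact List.mem_cons_of_mem _ (ih y)

-- the comparison A makes equals the leader test, at indices with a nonempty right part
lemma lead_iff (heights : List Int) (t : Nat) (ht : t + 1 < heights.length) :
    (heights.getD t 0 > Msuf heights (t + 1)) ↔ leadB heights t = true := by
  have hdrop : heights.drop (t + 1) = heights[t+1] :: heights.drop (t + 2) :=
    List.drop_eq_getElem_cons ht
  constructor
  · intro hgt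
    simp only [leadB, List.all_eq_true, decide_eq_true_eq]
    intro x hx
    have hle : x ≤ Msuf heights (t + 1) := by
      rw [hdrop] at hx
      unfold Msuf
      rw [List.getD_eq_getElem _ _ ht]
      rcases List.mem_cons.mp hx with h | h
      · subst h; exact self_le_mymax _ _
      · exact mem_le_mymax _ _ _ h
    omega
  · intro hall
    simp only [leadB, List.all_eq_true, decide_eq_true_eq] at hall
    have hmem : Msuf heights (t + 1) ∈ heights.drop (t + 1) := by
      unfold Msuf
      rw [hdrop, List.getD_eq_getElem _ _ ht]
      exact mymax_mem _ _
    exact hall _ hmem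

lemma Msuf_step_pos (heights : List Int) (t : Nat) (ht : t + 1 < heights.length)
    (h : heights.getD t 0 > Msuf heights (t + 1)) :
    Msuf heights t = heights.getD t 0 := by
  have hall := (lead_iff heights t ht).mp h
  simp only [leadB, List.all_eq_true, decide_eq_true_eq] at hall
  unfold Msuf
  induction' hys : heights.drop (t + 1) with y ys
  · rfl
  · rw [← hys]
    rcases List.mem_cons.mp (mymax_mem (heights.getD t 0) (heights.drop (t + 1))) with h' | h'
    · exact h'
    · have := hall _ h'
      have := self_le_mymax (heights.getD t 0) (heights.drop (t + 1))
      omega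

lemma Msuf_step_neg (heights : List Int) (t : Nat) (ht : t + 1 < heights.length)
    (h : ¬ heights.getD t 0 > Msuf heights (t + 1)) :
    Msuf heights t = Msuf heights (t + 1) := by
  have hdrop : heights.drop (t + 1) = heights[t+1] :: heights.drop (t + 2) :=
    List.drop_eq_getElem_cons ht
  unfold Msuf
  rw [hdrop, mymax_cons, List.getD_eq_getElem _ _ ht]
  have : mymax heights[t+1] (heights.drop (t + 2)) = Msuf heights (t + 1) := by
    unfold Msuf; rw [List.getD_eq_getElem _ _ ht]
  rw [this]
  omega

lemma Ldesc_step (heights : List Int) (t : Nat) (ht : t < heights.length) :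
    Ldesc heights t =
      if leadB heights t then Ldesc heights (t + 1) ++ [(t : Int)] else Ldesc heights (t + 1) := by
  unfold Ldesc
  have hn : heights.length - t = (heights.length - (t + 1)) + 1 := by omega
  rw [hn, List.range'_succ]
  by_cases h : leadB heights t
  · simp [h]
  · simp [h]

-- A's loop, from summary state at suffix t down to the full summary
lemma loop (heights : List Int) (t : Nat) (ht : t < heights.length) :
    (PySem.List.pyRange ((t : Int) - 1) (-1) (-1)).foldl
      (fun (s : Int × List Int) (i : Int) =>
        if PySem.List.pyGetD heights i 0 > s.1 then
          (PySem.List.pyGetD heights i 0, s.2 ++ [i])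
        else s)
      (Msuf heights t, Ldesc heights t) = (Msuf heights 0, Ldesc heights 0) := by
  induction t with
  | zero =>
      rw [PySem.List.pyRange_neg_one_eq_nil (by norm_num)]
      rfl
  | succ t ih =>
      have hcast : ((t + 1 : Nat) : Int) - 1 = (t : Int) := by push_cast; ring
      have hlt : (-1 : Int) < (t : Int) := by omega
      rw [hcast, PySem.List.pyRange_neg_one_cons hlt, List.foldl_cons]
      have hstep :
          (if PySem.List.pyGetD heights (t : Int) 0 > (Msuf heights (t+1), Ldesc heights (t+1)).1 then
             (PySem.List.pyGetD heights (t : Int) 0, (Msuf heights (t+1), Ldesc heights (t+1)).2 ++ [(t : Int)])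
           else (Msuf heights (t+1), Ldesc heights (t+1)))
          = (Msuf heights t, Ldesc heights t) := by
        simp only [PySem.List.pyGetD_natCast]
        by_cases h : heights.getD t 0 > Msuf heights (t + 1)
        · rw [if_pos h, Msuf_step_pos heights t ht h,
            Ldesc_step heights t (by omega), if_pos ((lead_iff heights t ht).mp h)]
        · rw [if_neg h, Msuf_step_neg heights t ht h,
            Ldesc_step heights t (by omega)]
          rw [if_neg (by
            intro hl
            exact h ((lead_iff heights t ht).mpr hl))]
      rw [hstep]
      exact ih (by omega)

-- B computes the ascending leader list
lemma solve_alt_eq (heights : List Int) :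
    solve_alt heights = ((List.range heights.length).filter (leadB heights)).map Int.ofNat := by
  unfold solve_alt
  rw [PySem.List.pyRange_zero_natCast, List.filter_map]
  congr 1
  apply List.filter_congr
  intro i hi
  simp only [Function.comp_apply]
  have h1 : ((i : Nat) : Int) + 1 = ((i + 1 : Nat) : Int) := by push_cast; ring
  have hall : (PySem.List.pyRange ((i : Int) + 1) (heights.length : Int) 1).all
      (fun j => decide (PySem.List.pyGetD heights (i : Int) 0 > PySem.List.pyGetD heights j 0))
      = ((PySem.List.pyRange ((i : Int) + 1) (heights.length : Int) 1).map
          (fun j => PySem.List.pyGetD heights j 0)).all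
          (fun x => decide (PySem.List.pyGetD heights (i : Int) 0 > x)) := by
    rw [List.all_map]
    rfl
  rw [hall, PySem.List.map_pyGetD_pyRange' heights 0 (by omega)]
  have htoNat : ((i : Int) + 1).toNat = i + 1 := by omega
  rw [htoNat]
  simp only [PySem.List.pyGetD_natCast]
  rfl

lemma Ldesc_zero (heights : List Int) :
    Ldesc heights 0 = (((List.range heights.length).filter (leadB heights)).map Int.ofNat).reverse := by
  unfold Ldesc
  rw [List.map_reverse, Nat.sub_zero, ← List.range_eq_range']

lemma asc_pairwise (heights : List Int) :
    (((List.range heights.length).filter (leadB heights)).map Int.ofNat).Pairwise (· < ·) := by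
  rw [List.pairwise_map]
  exact (List.pairwise_lt_range.filter _).imp (by intro a b h; exact Int.ofNat_lt.mpr h)

-- ===== VERDICT (by name: the statement is the Claim_ definition above) =====
theorem solve_spec : Claim_equal_solve := by
  intro heights _
  unfold Spec_solve
  by_cases hne : heights = []
  · subst hne; rfl
  · unfold solve
    rw [if_neg hne]
    have hlen : 0 < heights.length := List.length_pos_iff.mpr hne
    -- the initial state is the summary at t = heights.length - 1
    have hinit : (PySem.List.pyGetD heights (-1) 0, [(heights.length : Int) - 1]) =
        (Msuf heights (heights.length - 1), Ldesc heights (heights.length - 1)) := by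
      have h1 : PySem.List.pyGetD heights (-1) 0 = Msuf heights (heights.length - 1) := by
        rw [PySem.List.pyGetD_neg_one heights 0 hne]
        unfold Msuf
        have hdrop : heights.drop (heights.length - 1 + 1) = [] := by
          apply List.drop_eq_nil_of_le; omega
        rw [hdrop, List.getD_eq_getElem _ _ (by omega), List.getLast_eq_getElem]
        rfl
      have h2 : [(heights.length : Int) - 1] = Ldesc heights (heights.length - 1) := by
        unfold Ldesc
        have hn1 : heights.length - (heights.length - 1) = 1 := by omega
        rw [hn1, List.range'_one]
        have hlead : leadB heights (heights.length - 1) = true := by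
          simp only [leadB, List.all_eq_true]
          intro x hx
          rw [List.drop_eq_nil_of_le (by omega)] at hx
          cases hx
        simp only [List.filter_cons, hlead, if_true, List.filter_nil,
          List.reverse_singleton, List.map_cons, List.map_nil]
        congr 1
        rw [Int.ofNat_eq_natCast]
        omega
      rw [h1, h2]
    have hrange : ((heights.length : Int) - 2) = ((heights.length - 1 : Nat) : Int) - 1 := by
      omega
    rw [hinit, hrange, loop heights (heights.length - 1) (by omega)]
    rw [solve_alt_eq]
    exact PySem.List.sorted_eq_of_perm_of_pairwise_lt _ _ _
      (by rw [Ldesc_zero]; exact (List.reverse_perm _).symm)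
      (asc_pairwise heights)
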